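-- pv_equiv track=rewrite | github.com/fromthelake/MarioKart8_lanplay_video_processor | mk8_local_play/ocr_export.py | _truncate_review_reason
-- ===== SOURCE A (Python) =====
-- def _truncate_review_reason(parts: list[str], max_length: int) -> str:
--     if not parts:
--         return ""
--
--     joined = " | ".join(parts)
--     if len(joined) <= max_length:
--         return joined
--
--     kept_parts: list[str] = []
--     for index, part in enumerate(parts):
--         remaining = len(parts) - index - 1
--         candidate_parts = kept_parts + [part]
--         candidate = " | ".join(candidate_parts)
--         suffix = f" ... (+{remaining} more)" if remaining > 0 else ""
--         if len(candidate) + len(suffix) <= max_length: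
--             kept_parts.append(part)
--             continue
--         break
--
--     omitted = len(parts) - len(kept_parts)
--     if kept_parts:
--         truncated = " | ".join(kept_parts)
--         if omitted > 0:
--             return f"{truncated} ... (+{omitted} more)"
--         return truncated
--
--     first_part = parts[0]
--     if max_length <= 3:
--         return first_part[:max_length]
--     return first_part[: max_length - 3].rstrip() + "..."
-- ===== SOURCE B (Python) =====
-- def _truncate_review_reason(parts: list[str], max_length: int) -> str:
--     if not parts:
--         return ""
--
--     n = len(parts)
--     total = sum(len(p) for p in parts) + 3 * (n - 1)
--     if total <= max_length:
--         return " | ".join(parts)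
--
--     # Scan lengths only: track the running joined length instead of re-joining.
--     cur = 0
--     k = 0
--     for i in range(n):
--         cand = cur + len(parts[i]) + (3 if k > 0 else 0)
--         remaining = n - i - 1
--         suffix_len = 13 + len(str(remaining)) if remaining > 0 else 0
--         if cand + suffix_len <= max_length:
--             cur = cand
--             k += 1
--         else:
--             break
--
--     if k > 0:
--         truncated = " | ".join(parts[:k])
--         omitted = n - k
--         if omitted > 0:
--             return f"{truncated} ... (+{omitted} more)"
--         return truncated
--
--     first_part = parts[0]
--     if max_length <= 3:
--         return first_part[:max_length]
--     return first_part[: max_length - 3].rstrip() + "..."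
-- ===== Notes on version B (the rewrite author's own statement) =====
-- stated objective: faster
-- what changed: Instead of re-joining the kept prefix with ' | ' on every loop iteration, B tracks the running joined length and a kept-count in O(1) per part and performs a single join at the end (plus a closed-form total length instead of the initial full join's length).
import Mathlib
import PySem

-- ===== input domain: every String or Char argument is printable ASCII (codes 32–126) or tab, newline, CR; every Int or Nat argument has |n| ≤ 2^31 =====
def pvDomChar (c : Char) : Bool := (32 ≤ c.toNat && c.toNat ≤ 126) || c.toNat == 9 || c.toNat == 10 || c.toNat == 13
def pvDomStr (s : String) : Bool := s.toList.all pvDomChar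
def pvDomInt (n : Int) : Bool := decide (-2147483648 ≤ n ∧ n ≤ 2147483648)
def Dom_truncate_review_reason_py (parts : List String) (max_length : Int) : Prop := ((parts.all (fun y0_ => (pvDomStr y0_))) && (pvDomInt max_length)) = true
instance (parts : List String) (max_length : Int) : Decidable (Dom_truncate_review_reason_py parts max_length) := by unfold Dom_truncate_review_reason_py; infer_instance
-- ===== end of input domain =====

-- B replaces A's quadratic re-join of the kept prefix on every loop step by a single
-- length-only scan (running joined length + kept count), joining once at the end.

-- ===== PORT A =====
-- A's for-loop: kept_parts accumulator, break ports to returning kept.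
def pyALoop (max_length n : Int) : List String → Int → List String → List String
  | [], _, kept => kept
  | part :: rest, idx, kept =>
    let remaining := n - idx - 1
    let candidate_parts := kept ++ [part]
    let candidate := PySem.Str.join " | " candidate_parts
    let suffix := if remaining > 0 then " ... (+" ++ PySem.Int.toStr remaining ++ " more)" else ""
    if PySem.Str.len candidate + PySem.Str.len suffix ≤ max_length then
      pyALoop max_length n rest (idx + 1) candidate_parts
    else kept

def truncate_review_reason_py (parts : List String) (max_length : Int) : String :=
  match parts with
  | [] => ""
  | first_part :: _ =>
    let joined := PySem.Str.join " | " parts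
    if PySem.Str.len joined ≤ max_length then joined
    else
      let kept_parts := pyALoop max_length (PySem.List.len parts) parts 0 []
      let omitted := PySem.List.len parts - PySem.List.len kept_parts
      if kept_parts ≠ [] then
        let truncated := PySem.Str.join " | " kept_parts
        if omitted > 0 then truncated ++ " ... (+" ++ PySem.Int.toStr omitted ++ " more)"
        else truncated
      else
        if max_length ≤ 3 then PySem.Str.slice first_part none (some max_length)
        else PySem.Str.rstrip (PySem.Str.slice first_part none (some (max_length - 3))) ++ "..."

-- ===== PORT B =====
-- B's loop: only the running joined length `cur` and the count `k` are carried.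
def pyBLoop (max_length n : Int) : List String → Int → Int → Int → Int
  | [], _, _, k => k
  | part :: rest, i, cur, k =>
    let cand := cur + PySem.Str.len part + (if k > 0 then 3 else 0)
    let remaining := n - i - 1
    let suffix_len := if remaining > 0 then 13 + PySem.Str.len (PySem.Int.toStr remaining) else 0
    if cand + suffix_len ≤ max_length then
      pyBLoop max_length n rest (i + 1) cand (k + 1)
    else k

def truncate_review_reason_py_alt (parts : List String) (max_length : Int) : String :=
  match parts with
  | [] => ""
  | first_part :: _ =>
    let n := PySem.List.len parts
    let total := parts.foldl (fun a p => a + PySem.Str.len p) 0 + 3 * (n - 1)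
    if total ≤ max_length then PySem.Str.join " | " parts
    else
      let k := pyBLoop max_length n parts 0 0 0
      if k > 0 then
        let truncated := PySem.Str.join " | " (PySem.List.slice parts none (some k))
        let omitted := n - k
        if omitted > 0 then truncated ++ " ... (+" ++ PySem.Int.toStr omitted ++ " more)"
        else truncated
      else
        if max_length ≤ 3 then PySem.Str.slice first_part none (some max_length)
        else PySem.Str.rstrip (PySem.Str.slice first_part none (some (max_length - 3))) ++ "..."

-- ===== PRECONDITION & SPEC =====
def Spec_truncate_review_reason_py (parts : List String) (max_length : Int) (out : String) : Prop := out = truncate_review_reason_py_alt parts max_length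
instance (parts : List String) (max_length : Int) (out : String) : Decidable (Spec_truncate_review_reason_py parts max_length out) := by unfold Spec_truncate_review_reason_py; infer_instance

-- ===== CLAIM (what is proved, stated in full; the proofs are below) =====
def Claim_equal_truncate_review_reason_py : Prop := ∀ (parts : List String) (max_length : Int), Dom_truncate_review_reason_py parts max_length → Spec_truncate_review_reason_py parts max_length (truncate_review_reason_py parts max_length)

-- ===== LEMMAS AND PROOFS =====

-- length of the " | "-join of a list with one more part appended
theorem len_join_append (sep : List Char) (xs : List (List Char)) (x : List Char) :
    (PySem.Chars.join sep (xs ++ [x])).length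
      = (if xs = [] then 0 else (PySem.Chars.join sep xs).length + sep.length) + x.length := by
  induction xs with
  | nil => simp [PySem.Chars.join_singleton]
  | cons y ys ih =>
    cases ys with
    | nil =>
      simp [PySem.Chars.join_cons_cons, PySem.Chars.join_singleton]; omega
    | cons z zs =>
      have h1 : PySem.Chars.join sep (y :: (z :: zs) ++ [x])
          = y ++ sep ++ PySem.Chars.join sep ((z :: zs) ++ [x]) := by
        simpa using PySem.Chars.join_cons_cons sep y z (zs ++ [x])
      have h2 := PySem.Chars.join_cons_cons sep y z zs
      simp only [List.cons_append] at h1 ih ⊢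
      rw [h1, h2, List.length_append, List.length_append, ih]
      simp only [List.length_append]
      rw [if_neg (List.cons_ne_nil z zs), if_neg (List.cons_ne_nil y (z :: zs))]
      omega

theorem len_join_nonempty (sep : List Char) (xs : List (List Char)) (h : xs ≠ []) :
    ((PySem.Chars.join sep xs).length : Int)
      = xs.foldl (fun a l => a + (l.length : Int)) 0 + (sep.length : Int) * ((xs.length : Int) - 1) := by
  induction xs using List.reverseRecOn with
  | nil => simp at h
  | append_singleton ys y ih =>
    rw [len_join_append]
    by_cases hy : ys = []
    · subst hy; simp
    · rw [if_neg hy]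
      have hlen : 1 ≤ ys.length := List.length_pos_iff.mpr hy
      have ihy := ih hy
      simp only [List.foldl_append, List.foldl_cons, List.foldl_nil, List.length_append,
        List.length_cons, List.length_nil]
      push_cast
      push_cast at ihy
      linear_combination ihy

theorem len_suffix (r : Int) :
    PySem.Str.len (" ... (+" ++ PySem.Int.toStr r ++ " more)")
      = 13 + PySem.Str.len (PySem.Int.toStr r) := by
  simp [PySem.Str.len_eq, String.toList_append]
  omega

theorem pyBLoop_ge (m n : Int) : ∀ (rest : List String) (i cur k : Int),
    k ≤ pyBLoop m n rest i cur k := by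
  intro rest
  induction rest with
  | nil => intro i cur k; simp [pyBLoop]
  | cons part rest ih =>
    intro i cur k
    simp only [pyBLoop]
    by_cases h : (cur + PySem.Str.len part + (if k > 0 then 3 else 0)
        + (if n - i - 1 > 0 then 13 + PySem.Str.len (PySem.Int.toStr (n - i - 1)) else 0)) ≤ m
    · rw [if_pos h]
      have := ih (i + 1) (cur + PySem.Str.len part + (if k > 0 then 3 else 0)) (k + 1)
      omega
    · rw [if_neg h]

theorem pyBLoop_le (m n : Int) : ∀ (rest : List String) (i cur k : Int),
    pyBLoop m n rest i cur k ≤ k + rest.length := by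
  intro rest
  induction rest with
  | nil => intro i cur k; simp [pyBLoop]
  | cons part rest ih =>
    intro i cur k
    simp only [pyBLoop, List.length_cons]
    by_cases h : (cur + PySem.Str.len part + (if k > 0 then 3 else 0)
        + (if n - i - 1 > 0 then 13 + PySem.Str.len (PySem.Int.toStr (n - i - 1)) else 0)) ≤ m
    · rw [if_pos h]
      have := ih (i + 1) (cur + PySem.Str.len part + (if k > 0 then 3 else 0)) (k + 1)
      push_cast
      push_cast at this
      omega
    · rw [if_neg h]
      push_cast
      omega

theorem loop_eq (m n : Int) : ∀ (rest : List String) (idx : Int) (kept : List String),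
    pyALoop m n rest idx kept
      = kept ++ rest.take ((pyBLoop m n rest idx
          (PySem.Str.len (PySem.Str.join " | " kept)) (kept.length : Int)) - (kept.length : Int)).toNat := by
  intro rest
  induction rest with
  | nil => intro idx kept; simp [pyALoop, pyBLoop]
  | cons part rest ih =>
    intro idx kept
    -- the two loop conditions agree
    have hcand : PySem.Str.len (PySem.Str.join " | " kept) + PySem.Str.len part
          + (if (kept.length : Int) > 0 then 3 else 0)
        = PySem.Str.len (PySem.Str.join " | " (kept ++ [part])) := by
      simp only [PySem.Str.len_eq, PySem.Str.toList_join, List.map_append, List.map_cons,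
        List.map_nil]
      rw [len_join_append]
      by_cases hk : kept = []
      · subst hk; simp [PySem.Chars.join_nil]
      · have h1 : ¬ (List.map String.toList kept = []) := by simpa using hk
        have h2 : ((kept.length : Int)) > 0 := by
          have := List.length_pos_iff.mpr hk
          omega
        rw [if_neg h1, if_pos h2]
        have h3 : ((" | " : String).toList).length = 3 := rfl
        rw [h3]
        push_cast
        ring
    have hsuf : (PySem.Str.len (if n - idx - 1 > 0 then " ... (+" ++ PySem.Int.toStr (n - idx - 1) ++ " more)" else ""))
        = (if n - idx - 1 > 0 then 13 + PySem.Str.len (PySem.Int.toStr (n - idx - 1)) else 0) := by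
      split
      · exact len_suffix _
      · simp [PySem.Str.len_eq]
    simp only [pyALoop, pyBLoop]
    rw [hsuf, hcand]
    by_cases h : PySem.Str.len (PySem.Str.join " | " (kept ++ [part]))
        + (if n - idx - 1 > 0 then 13 + PySem.Str.len (PySem.Int.toStr (n - idx - 1)) else 0) ≤ m
    · rw [if_pos h, if_pos h]
      rw [ih (idx + 1) (kept ++ [part])]
      have hcast : (((kept ++ [part]).length : Int)) = (kept.length : Int) + 1 := by
        simp
      rw [hcast]
      have hb := pyBLoop_ge m n rest (idx + 1)
        (PySem.Str.len (PySem.Str.join " | " (kept ++ [part]))) ((kept.length : Int) + 1)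
      set b := pyBLoop m n rest (idx + 1)
        (PySem.Str.len (PySem.Str.join " | " (kept ++ [part]))) ((kept.length : Int) + 1) with hbdef
      have htk : ((b - (kept.length : Int)).toNat) = (b - ((kept.length : Int) + 1)).toNat + 1 := by
        omega
      rw [htk, List.take_succ_cons, List.append_assoc]
      simp
    · rw [if_neg h, if_neg h]
      simp

theorem join_empty_len : PySem.Str.len (PySem.Str.join " | " []) = 0 := by
  simp [PySem.Str.len_eq, PySem.Str.toList_join, PySem.Chars.join_nil]

theorem join_len_foldl (P : List String) (h : P ≠ []) :
    P.foldl (fun a p => a + PySem.Str.len p) 0 + 3 * (PySem.List.len P - 1)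
      = PySem.Str.len (PySem.Str.join " | " P) := by
  rw [PySem.Str.len_eq, PySem.Str.toList_join,
    len_join_nonempty _ _ (by simpa using h)]
  have hf : P.foldl (fun a p => a + PySem.Str.len p) 0
      = (P.map String.toList).foldl (fun a l => a + (l.length : Int)) 0 := by
    simp [List.foldl_map, PySem.Str.len_eq]
  rw [hf]
  simp [PySem.List.len_eq]

theorem main_cons (first : String) (rest : List String) (m : Int) :
    truncate_review_reason_py (first :: rest) m = truncate_review_reason_py_alt (first :: rest) m := by
  have htot := join_len_foldl (first :: rest) (by simp)
  have hkept : pyALoop m (PySem.List.len (first :: rest)) (first :: rest) 0 []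
      = (first :: rest).take ((pyBLoop m (PySem.List.len (first :: rest)) (first :: rest) 0 0 0).toNat) := by
    have h := loop_eq m (PySem.List.len (first :: rest)) (first :: rest) 0 []
    simpa [join_empty_len] using h
  have hk0 : 0 ≤ pyBLoop m (PySem.List.len (first :: rest)) (first :: rest) 0 0 0 :=
    pyBLoop_ge _ _ _ _ _ _
  have hkle : pyBLoop m (PySem.List.len (first :: rest)) (first :: rest) 0 0 0
      ≤ ((first :: rest).length : Int) := by
    have := pyBLoop_le m (PySem.List.len (first :: rest)) (first :: rest) 0 0 0
    omega
  set k := pyBLoop m (PySem.List.len (first :: rest)) (first :: rest) 0 0 0 with hkdef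
  have hlt : PySem.List.len ((first :: rest).take k.toNat) = k := by
    simp only [PySem.List.len_eq, List.length_take]
    omega
  have hc : ((first :: rest).take k.toNat ≠ []) ↔ k > 0 := by
    constructor
    · intro hne
      by_contra hle
      have hz : k.toNat = 0 := by omega
      simp [hz] at hne
    · intro hpos heq
      rw [heq] at hlt
      simp [PySem.List.len_eq] at hlt
      omega
  have hslice : PySem.List.slice (first :: rest) none (some k)
      = (first :: rest).take k.toNat := PySem.List.slice_to _ hk0
  simp only [truncate_review_reason_py, truncate_review_reason_py_alt]
  rw [← htot, hkept, ← hkdef]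
  by_cases h1 : List.foldl (fun a p => a + PySem.Str.len p) 0 (first :: rest)
      + 3 * (PySem.List.len (first :: rest) - 1) ≤ m
  · rw [if_pos h1, if_pos h1]
  · rw [if_neg h1, if_neg h1, hslice, hlt]
    by_cases hkp : k > 0
    · rw [if_pos (hc.mpr hkp), if_pos hkp]
    · rw [if_neg (fun hx => hkp (hc.mp hx)), if_neg hkp]

-- ===== VERDICT (by name: the statement is the Claim_ definition above) =====
theorem truncate_review_reason_py_spec : Claim_equal_truncate_review_reason_py := by
  intro parts max_length _
  unfold Spec_truncate_review_reason_py
  cases parts with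
  | nil => rfl
  | cons first rest => exact main_cons first rest max_length
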